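-- pv_equiv track=rewrite | github.com/AmenRa/amdbfpse-baselines | src/data/collators/train_collator.py | compute_in_batch_random_negative_mask
-- ===== SOURCE A (Python) =====
-- def compute_in_batch_random_negative_mask(
--
--     batch_rel_doc_ids: list[list[str]],
--     pos_doc_ids: list[str],
--     neg_doc_ids: list[str],
-- ) -> list[list[bool]]:
--     """Compute in-batch random negative mask.
--
--     Args:
--         batch_rel_doc_ids (list[list[str]]): Relevant document ids for the queries in the batch.
--
--         pos_doc_ids (list[str]): Positive document ids for the current batch.
--
--         neg_doc_ids (list[str]): Hard negative document ids for the current batch.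
--
--     Returns:
--         list[list[bool]]: In-batch random negative mask. Each element is a list of booleans indicating the eligibility of the training documents as random negatives for a specific query of the batch.
--     """
--     batch_doc_ids = pos_doc_ids + neg_doc_ids
--
--     rand_neg_mask = [None] * len(batch_rel_doc_ids)
--     for i, _ in enumerate(batch_rel_doc_ids):
--         not_eligible = [
--             *batch_rel_doc_ids[i],
--             pos_doc_ids[i],
--             neg_doc_ids[i],
--         ]
--         rand_neg_mask[i] = [id not in not_eligible for id in batch_doc_ids]
--
--     return rand_neg_mask
-- ===== SOURCE B (Python) =====
-- def compute_in_batch_random_negative_mask(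
--     batch_rel_doc_ids: list[list[str]],
--     pos_doc_ids: list[str],
--     neg_doc_ids: list[str],
-- ) -> list[list[bool]]:
--     batch_doc_ids = pos_doc_ids + neg_doc_ids
--     # index: doc id -> all of its positions in the batch (once, up front)
--     index = {}
--     for j, doc_id in enumerate(batch_doc_ids):
--         index.setdefault(doc_id, []).append(j)
--     rand_neg_mask = []
--     for rel_ids, pid, nid in zip(batch_rel_doc_ids, pos_doc_ids, neg_doc_ids):
--         row = [True] * len(batch_doc_ids)
--         for doc_id in rel_ids + [pid, nid]:
--             for p in index.get(doc_id, []):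
--                 row[p] = False
--         rand_neg_mask.append(row)
--     return rand_neg_mask
-- ===== Notes on version B (the rewrite author's own statement) =====
-- stated objective: faster
-- what changed: Instead of testing every batch doc id against the ineligible list per query (scan-and-test), B builds a position index of the batch once and per query starts from an all-True row and knocks out the positions of each ineligible id.
import Mathlib
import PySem

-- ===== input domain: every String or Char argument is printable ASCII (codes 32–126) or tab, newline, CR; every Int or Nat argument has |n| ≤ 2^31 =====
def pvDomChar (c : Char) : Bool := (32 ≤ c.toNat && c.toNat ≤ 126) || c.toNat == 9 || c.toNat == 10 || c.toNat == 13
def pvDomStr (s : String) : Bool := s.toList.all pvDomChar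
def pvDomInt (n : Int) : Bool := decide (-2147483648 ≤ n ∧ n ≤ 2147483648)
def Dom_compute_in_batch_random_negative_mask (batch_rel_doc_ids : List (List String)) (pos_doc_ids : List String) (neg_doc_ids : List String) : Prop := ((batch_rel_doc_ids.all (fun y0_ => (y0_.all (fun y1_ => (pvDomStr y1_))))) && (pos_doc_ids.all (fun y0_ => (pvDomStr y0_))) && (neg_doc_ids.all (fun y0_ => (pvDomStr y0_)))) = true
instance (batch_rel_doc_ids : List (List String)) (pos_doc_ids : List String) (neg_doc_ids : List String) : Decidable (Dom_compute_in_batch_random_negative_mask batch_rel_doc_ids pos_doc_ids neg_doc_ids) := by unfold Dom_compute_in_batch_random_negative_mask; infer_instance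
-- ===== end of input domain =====

-- B replaces A's per-query scan-and-test against the ineligible list by one position
-- index of the batch built up front plus an all-True row with positions knocked out.

-- ===== PORT A =====
-- A: for each query i, build not_eligible = rel_ids[i] ++ [pos[i], neg[i]] and test every
-- batch doc id for membership.  Indices i are in range under Pre_ (Python raises
-- IndexError outside Pre_, which Pre_ excludes), so getD is exact there.
def compute_in_batch_random_negative_mask (batch_rel_doc_ids : List (List String)) (pos_doc_ids : List String) (neg_doc_ids : List String) : List (List Bool) :=
  let batch_doc_ids := pos_doc_ids ++ neg_doc_ids
  (List.range batch_rel_doc_ids.length).map (fun i =>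
    let not_eligible := (batch_rel_doc_ids.getD i []) ++ [pos_doc_ids.getD i "", neg_doc_ids.getD i ""]
    batch_doc_ids.map (fun id => !(not_eligible.contains id)))

-- ===== PORT B =====
-- index.setdefault(doc_id, []).append(j) over enumerate(batch_doc_ids)
def pvBuildIndex (batch : List String) : PySem.Dict String (List Int) :=
  (PySem.List.enumerate batch 0).foldl
    (fun d x => d.insert x.2 ((d.getD x.2 []) ++ [x.1])) PySem.Dict.empty

-- row = [True]*n; for doc_id in ids: for p in index.get(doc_id, []): row[p] = False
-- (the stored positions come from enumerate, hence are ≥ 0, so p.toNat is exact)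
def pvKnockRow (index : PySem.Dict String (List Int)) (n : Nat) (ids : List String) : List Bool :=
  ids.foldl (fun row id => (index.getD id []).foldl (fun r p => r.set p.toNat false) row)
    (List.replicate n true)

def compute_in_batch_random_negative_mask_alt (batch_rel_doc_ids : List (List String)) (pos_doc_ids : List String) (neg_doc_ids : List String) : List (List Bool) :=
  let batch_doc_ids := pos_doc_ids ++ neg_doc_ids
  let index := pvBuildIndex batch_doc_ids
  (batch_rel_doc_ids.zip (pos_doc_ids.zip neg_doc_ids)).map
    (fun x => pvKnockRow index batch_doc_ids.length (x.1 ++ [x.2.1, x.2.2]))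

-- ===== PRECONDITION & SPEC =====
-- Python A indexes pos_doc_ids[i] and neg_doc_ids[i] for every i < len(batch_rel_doc_ids)
-- and raises IndexError when either list is shorter; Pre_ excludes exactly those inputs.
def Pre_compute_in_batch_random_negative_mask (batch_rel_doc_ids : List (List String)) (pos_doc_ids : List String) (neg_doc_ids : List String) : Prop :=
  batch_rel_doc_ids.length ≤ pos_doc_ids.length ∧ batch_rel_doc_ids.length ≤ neg_doc_ids.length
instance (batch_rel_doc_ids : List (List String)) (pos_doc_ids : List String) (neg_doc_ids : List String) : Decidable (Pre_compute_in_batch_random_negative_mask batch_rel_doc_ids pos_doc_ids neg_doc_ids) := by unfold Pre_compute_in_batch_random_negative_mask; infer_instance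

def pvWitness_compute_in_batch_random_negative_mask : List (List String) × List String × List String :=
  ([["d1"], ["d2", "d1"]], ["d1", "d2"], ["d3", "d4"])

def Spec_compute_in_batch_random_negative_mask (batch_rel_doc_ids : List (List String)) (pos_doc_ids : List String) (neg_doc_ids : List String) (out : List (List Bool)) : Prop := out = compute_in_batch_random_negative_mask_alt batch_rel_doc_ids pos_doc_ids neg_doc_ids
instance (batch_rel_doc_ids : List (List String)) (pos_doc_ids : List String) (neg_doc_ids : List String) (out : List (List Bool)) : Decidable (Spec_compute_in_batch_random_negative_mask batch_rel_doc_ids pos_doc_ids neg_doc_ids out) := by unfold Spec_compute_in_batch_random_negative_mask; infer_instance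

-- ===== CLAIM (what is proved, stated in full; the proofs are below) =====
def Claim_equal_compute_in_batch_random_negative_mask : Prop := ∀ (batch_rel_doc_ids : List (List String)) (pos_doc_ids : List String) (neg_doc_ids : List String), Dom_compute_in_batch_random_negative_mask batch_rel_doc_ids pos_doc_ids neg_doc_ids → Pre_compute_in_batch_random_negative_mask batch_rel_doc_ids pos_doc_ids neg_doc_ids → Spec_compute_in_batch_random_negative_mask batch_rel_doc_ids pos_doc_ids neg_doc_ids (compute_in_batch_random_negative_mask batch_rel_doc_ids pos_doc_ids neg_doc_ids)

-- ===== LEMMAS AND PROOFS =====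

-- index-building fold: the list stored for id is the old one plus the first components
-- of the pairs whose second component is id
lemma pvIdx_foldl (l : List (Int × String)) (d : PySem.Dict String (List Int)) (id : String) :
    (l.foldl (fun d x => d.insert x.2 ((d.getD x.2 []) ++ [x.1])) d).getD id []
      = d.getD id [] ++ (l.filter (fun x => x.2 == id)).map (·.1) := by
  induction l generalizing d with
  | nil => simp
  | cons a t ih =>
    simp only [List.foldl_cons, ih, List.filter_cons]
    by_cases h : a.2 = id
    · simp [h]
    · simp [PySem.Dict.getD_insert, h, Ne.symm h]

lemma pvMem_buildIndex (batch : List String) (id : String) (q : Int) :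
    q ∈ (pvBuildIndex batch).getD id []
      ↔ ∃ k : Nat, ∃ hk : k < batch.length, q = (k : Int) ∧ batch[k] = id := by
  unfold pvBuildIndex
  rw [pvIdx_foldl]
  simp only [PySem.Dict.getD_empty, List.nil_append, List.mem_map, List.mem_filter,
    PySem.List.mem_enumerate_iff]
  constructor
  · rintro ⟨x, ⟨⟨k, hk, rfl⟩, hx⟩, rfl⟩
    exact ⟨k, hk, by simpa using hx.symm ▸ rfl, by simpa using hx⟩
  · rintro ⟨k, hk, rfl, rfl⟩
    exact ⟨((k : Int), batch[k]), ⟨⟨k, hk, by simp⟩, by simp⟩, rfl⟩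

lemma pvNonneg_buildIndex (batch : List String) (id : String) (q : Int)
    (hq : q ∈ (pvBuildIndex batch).getD id []) : 0 ≤ q := by
  rcases (pvMem_buildIndex batch id q).1 hq with ⟨k, _, rfl, _⟩
  exact Int.natCast_nonneg k

lemma pvLength_foldl_set (ps : List Int) (r : List Bool) :
    (ps.foldl (fun r p => r.set p.toNat false) r).length = r.length := by
  induction ps generalizing r with
  | nil => rfl
  | cons p t ih => simp [ih]

lemma pvGetElem?_foldl_set (ps : List Int) (r : List Bool) (j : Nat)
    (hnn : ∀ p ∈ ps, 0 ≤ p) :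
    (ps.foldl (fun r p => r.set p.toNat false) r)[j]?
      = if (j : Int) ∈ ps ∧ j < r.length then some false else r[j]? := by
  induction ps generalizing r with
  | nil => simp
  | cons p t ih =>
    have hp : 0 ≤ p := hnn p (by simp)
    have ht : ∀ q ∈ t, 0 ≤ q := fun q hq => hnn q (by simp [hq])
    simp only [List.foldl_cons]
    rw [ih _ ht]
    have hlen : (r.set p.toNat false).length = r.length := by simp
    have hget : (r.set p.toNat false)[j]?
        = if (j : Int) = p ∧ j < r.length then some false else r[j]? := by
      rw [List.getElem?_set]
      by_cases h2 : (j : Int) = p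
      · have hpj : p.toNat = j := by omega
        by_cases h3 : j < r.length
        · simp [hpj, h2, h3]
        · have hr : r[j]? = none := List.getElem?_eq_none (by omega)
          rw [if_pos hpj, if_neg (show ¬ p.toNat < r.length by omega), if_neg (by simp [h3]), hr]
      · have hpj : ¬ p.toNat = j := by omega
        simp [hpj, h2]
    rw [hlen, hget]
    simp only [List.mem_cons]
    by_cases h1 : (j : Int) ∈ t <;> by_cases h2 : (j : Int) = p <;>
      by_cases h3 : j < r.length <;> simp [h1, h2, h3]

lemma pvKnock_len (batch : List String) (ids : List String) :
    ∀ row : List Bool,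
      (ids.foldl (fun row id => ((pvBuildIndex batch).getD id []).foldl
        (fun r p => r.set p.toNat false) row) row).length = row.length := by
  induction ids with
  | nil => intro row; rfl
  | cons id t ih =>
    intro row
    simp only [List.foldl_cons]
    rw [ih, pvLength_foldl_set]

lemma pvKnock_aux (batch ids : List String) (j : Nat) (hj : j < batch.length) :
    ∀ row : List Bool, row.length = batch.length →
    (ids.foldl (fun row id => ((pvBuildIndex batch).getD id []).foldl
        (fun r p => r.set p.toNat false) row) row)[j]?
      = if batch[j] ∈ ids then some false else row[j]? := by
  induction ids with
  | nil => intro row _; simp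
  | cons id t ih =>
    intro row hrow
    simp only [List.foldl_cons]
    have hlen : (((pvBuildIndex batch).getD id []).foldl
        (fun r p => r.set p.toNat false) row).length = batch.length := by
      rw [pvLength_foldl_set]; exact hrow
    rw [ih _ hlen]
    have hmem : (j : Int) ∈ (pvBuildIndex batch).getD id [] ↔ batch[j] = id := by
      rw [pvMem_buildIndex]
      constructor
      · rintro ⟨k, hk, hkj, rfl⟩
        have : k = j := by omega
        subst this; rfl
      · intro h; exact ⟨j, hj, rfl, h⟩
    rw [pvGetElem?_foldl_set _ _ _ (pvNonneg_buildIndex batch id)]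
    by_cases h1 : batch[j] ∈ t <;> by_cases h2 : batch[j] = id <;>
      simp [h1, h2, hmem, hrow, hj]

-- one row of B equals one row of A
lemma pvRow_eq (batch ne : List String) :
    pvKnockRow (pvBuildIndex batch) batch.length ne
      = batch.map (fun id => !(ne.contains id)) := by
  apply List.ext_getElem?
  intro j
  by_cases hj : j < batch.length
  · unfold pvKnockRow
    rw [pvKnock_aux batch ne j hj _ (by simp)]
    by_cases h : batch[j] ∈ ne <;>
      simp [h, hj]
  · have h1 : (pvKnockRow (pvBuildIndex batch) batch.length ne).length = batch.length := by
      unfold pvKnockRow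
      rw [pvKnock_len]
      simp
    rw [List.getElem?_eq_none (by omega), List.getElem?_eq_none (by simpa [h1] using Nat.le_of_not_lt hj)]

-- the range-indexed loop of A equals the zip loop of B when both id lists are long enough
lemma pvZip_range (g : List String → String → String → List Bool) :
    ∀ (brel : List (List String)) (pos neg : List String),
      brel.length ≤ pos.length → brel.length ≤ neg.length →
      (List.range brel.length).map (fun i => g (brel.getD i []) (pos.getD i "") (neg.getD i ""))
        = (brel.zip (pos.zip neg)).map (fun x => g x.1 x.2.1 x.2.2) := by
  intro brel
  induction brel with
  | nil => intro pos neg _ _; simp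
  | cons rel brt ih =>
    intro pos neg hp hn
    cases pos with
    | nil => simp at hp
    | cons p pt =>
      cases neg with
      | nil => simp at hn
      | cons q nt =>
        simp only [List.length_cons, List.range_succ_eq_map, List.map_cons, List.map_map]
        simp only [List.zip_cons_cons, List.map_cons]
        congr 1
        rw [← ih pt nt (by simpa using hp) (by simpa using hn)]
        apply List.map_congr_left
        intro i _
        simp

-- ===== VERDICT (by name: the statement is the Claim_ definition above) =====
theorem compute_in_batch_random_negative_mask_spec : Claim_equal_compute_in_batch_random_negative_mask := by
  intro brel pos neg _ hpre
  unfold Spec_compute_in_batch_random_negative_mask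
  unfold compute_in_batch_random_negative_mask compute_in_batch_random_negative_mask_alt
  simp only []
  rw [pvZip_range (fun rel p q => (pos ++ neg).map
        (fun id => !((rel ++ [p, q]).contains id))) brel pos neg hpre.1 hpre.2]
  apply List.map_congr_left
  intro x _
  exact (pvRow_eq (pos ++ neg) (x.1 ++ [x.2.1, x.2.2])).symm
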